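-- pv_equiv track=rewrite | github.com/MarioCalvarro/ACOM | prog2.py | min_suma_casillas
-- ===== SOURCE A (Python) =====
-- def min_suma_casillas(n,m,a):
--     maximo = 0
--     for i in range(n): # calculamos una cota superior
--         for j in range(m):
--             if a[i][j] > 0:
--                 maximo = maximo + a[i][j]
--
--     matriz = [[[maximo] * 3 for _ in range(m)] for _ in range(n)]
--     matriz[0][0][0] = a[0][0]
--
--     for i in range(n):
--         for j in range(m):
--
--             if i == 0 and j == 0:
--                 continue
--
--             arriba, izquierda = maximo, maximo
--
--             if i > 0: #viene de arriba
--                 arriba = min(matriz[i-1][j])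
--
--             if j > 0: # viene de la izquierda
--                 izquierda = min(matriz[i][j-1])
--
--             if j > 1 and i > 0: #hace un salto de caballo
--                 matriz[i][j][1] = matriz[i-1][j-2][0] + a[i][j]
--                 matriz[i][j][2] = matriz[i-1][j-2][1] + a[i][j]
--
--             matriz[i][j][0] = min(arriba, izquierda) + a[i][j]
--
--
--     return min (matriz[n-1][m-1])
-- ===== SOURCE B (Python) =====
-- def min_suma_casillas(n, m, a):
--     # top-down memoized recursion over (cell, arrival-mode) instead of a bottom-up table
--     maximo = sum(x for fila in a[:n] for x in fila[:m] if x > 0)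
--     memo = {}
--
--     def f(i, j, k):
--         key = (i, j, k)
--         if key in memo:
--             return memo[key]
--         if k == 0:
--             if i == 0 and j == 0:
--                 r = a[0][0]
--             else:
--                 arriba = min(f(i-1, j, 0), f(i-1, j, 1), f(i-1, j, 2)) if i > 0 else maximo
--                 izquierda = min(f(i, j-1, 0), f(i, j-1, 1), f(i, j-1, 2)) if j > 0 else maximo
--                 r = min(arriba, izquierda) + a[i][j]
--         elif k == 1:
--             r = f(i-1, j-2, 0) + a[i][j] if i > 0 and j > 1 else maximo
--         else:
--             r = f(i-1, j-2, 1) + a[i][j] if i > 0 and j > 1 else maximo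
--         memo[key] = r
--         return r
--
--     return min(f(n-1, m-1, 0), f(n-1, m-1, 1), f(n-1, m-1, 2))
-- ===== Notes on version B (the rewrite author's own statement) =====
-- stated objective: alternative
-- what changed: B replaces A's bottom-up mutable n*m*3 sentinel table with a top-down memoized recursion f(i,j,mode) over (cell, arrival-mode) states, exploring only the states reachable from the bottom-right cell, with the bound computed by a comprehension sum instead of nested counting loops.
import Mathlib
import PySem

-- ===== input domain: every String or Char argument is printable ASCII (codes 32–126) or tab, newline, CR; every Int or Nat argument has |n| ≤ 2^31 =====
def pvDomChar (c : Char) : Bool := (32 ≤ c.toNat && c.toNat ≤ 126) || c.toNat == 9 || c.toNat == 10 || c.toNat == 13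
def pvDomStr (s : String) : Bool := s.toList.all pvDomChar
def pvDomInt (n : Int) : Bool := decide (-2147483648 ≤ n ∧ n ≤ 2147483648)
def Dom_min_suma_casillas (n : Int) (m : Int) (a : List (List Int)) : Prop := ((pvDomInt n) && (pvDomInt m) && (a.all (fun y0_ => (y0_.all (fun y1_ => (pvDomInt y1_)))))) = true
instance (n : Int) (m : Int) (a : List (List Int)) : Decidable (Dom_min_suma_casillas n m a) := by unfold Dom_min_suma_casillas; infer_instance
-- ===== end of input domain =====

-- B replaces A's bottom-up sentinel-initialised n×m×3 table with a top-down memoized recursion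
-- f(i, j, mode) over (cell, arrival-mode) states (alternative decomposition; A mutates only its
-- local table, never an argument). Equivalence is proved on all inputs where A returns.

-- ===== PORT A =====
-- a[i][j]; exact under Pre_ (both indices in range, nonnegative where used)
def pvAget (a : List (List Int)) (i j : Int) : Int :=
  PySem.List.pyGetD (PySem.List.pyGetD a i []) j 0

-- min(l) on the 3-element cell lists (never empty where A calls it)
def pvMin3 (l : List Int) : Int := (PySem.List.min? l (fun x => x)).getD 0

-- matriz[i][j]
def pvTget (mz : List (List (List Int))) (i j : Int) : List Int :=
  PySem.List.pyGetD (PySem.List.pyGetD mz i []) j []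

-- matriz[i][j][k]
def pvCell (mz : List (List (List Int))) (i j k : Int) : Int :=
  PySem.List.pyGetD (pvTget mz i j) k 0

-- matriz[i][j][k] = v (functional model of the in-place write; exact where the indices are
-- in range, which holds everywhere A executes it under Pre_)
def pvTset (mz : List (List (List Int))) (i j : Int) (k : Nat) (v : Int) :
    List (List (List Int)) :=
  PySem.List.pySetD mz i
    (PySem.List.pySetD (PySem.List.pyGetD mz i []) j ((pvTget mz i j).set k v))

-- body of A's inner loop, for one (i, j)
def pvStepA (a : List (List Int)) (maximo : Int) (i : Int)
    (mz : List (List (List Int))) (j : Int) : List (List (List Int)) :=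
  if i == 0 && j == 0 then mz
  else
    let arriba := if i > 0 then pvMin3 (pvTget mz (i-1) j) else maximo
    let izquierda := if j > 0 then pvMin3 (pvTget mz i (j-1)) else maximo
    let mz1 :=
      if j > 1 && i > 0 then
        let mzA := pvTset mz i j 1 (pvCell mz (i-1) (j-2) 0 + pvAget a i j)
        pvTset mzA i j 2 (pvCell mzA (i-1) (j-2) 1 + pvAget a i j)
      else mz
    pvTset mz1 i j 0 (min arriba izquierda + pvAget a i j)

def min_suma_casillas (n : Int) (m : Int) (a : List (List Int)) : Int :=
  let maximo := (PySem.List.pyRange 0 n 1).foldl (fun mx i =>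
      (PySem.List.pyRange 0 m 1).foldl (fun mx j =>
        if pvAget a i j > 0 then mx + pvAget a i j else mx) mx) 0
  let matriz0 := (PySem.List.pyRange 0 n 1).map (fun _ =>
      (PySem.List.pyRange 0 m 1).map (fun _ => [maximo, maximo, maximo]))
  let matriz1 := pvTset matriz0 0 0 0 (pvAget a 0 0)
  let matriz := (PySem.List.pyRange 0 n 1).foldl (fun mz i =>
      (PySem.List.pyRange 0 m 1).foldl (pvStepA a maximo i) mz) matriz1
  pvMin3 (pvTget matriz (n-1) (m-1))

-- ===== PORT B =====
-- the memoized recursion f(i, j, k) of Source B: returns the value together with the updated memo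
-- (the Python closure's dict, threaded explicitly; the fuel argument is only a structural
-- totality guard — the entry call passes enough fuel for every reachable state)
def pvBf (a : List (List Int)) (mx : Int) :
    Nat → Int → Int → Int → PySem.Dict (Int × Int × Int) Int →
      Int × PySem.Dict (Int × Int × Int) Int
  | 0, _, _, _, memo => (0, memo)
  | fuel+1, i, j, k, memo =>
    match memo.get? (i, j, k) with
    | some v => (v, memo)
    | none =>
      let r :=
        if k == 0 then
          if i == 0 && j == 0 then (pvAget a 0 0, memo)
          else
            let pa :=
              if i > 0 then
                let r0 := pvBf a mx fuel (i-1) j 0 memo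
                let r1 := pvBf a mx fuel (i-1) j 1 r0.2
                let r2 := pvBf a mx fuel (i-1) j 2 r1.2
                (min (min r0.1 r1.1) r2.1, r2.2)
              else (mx, memo)
            let pi :=
              if j > 0 then
                let r0 := pvBf a mx fuel i (j-1) 0 pa.2
                let r1 := pvBf a mx fuel i (j-1) 1 r0.2
                let r2 := pvBf a mx fuel i (j-1) 2 r1.2
                (min (min r0.1 r1.1) r2.1, r2.2)
              else (mx, pa.2)
            (min pa.1 pi.1 + pvAget a i j, pi.2)
        else if k == 1 then
          if i > 0 && j > 1 then
            let r0 := pvBf a mx fuel (i-1) (j-2) 0 memo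
            (r0.1 + pvAget a i j, r0.2)
          else (mx, memo)
        else
          if i > 0 && j > 1 then
            let r1 := pvBf a mx fuel (i-1) (j-2) 1 memo
            (r1.1 + pvAget a i j, r1.2)
          else (mx, memo)
      (r.1, r.2.insert (i, j, k) r.1)

def min_suma_casillas_alt (n : Int) (m : Int) (a : List (List Int)) : Int :=
  let maximo := ((PySem.List.slice a none (some n)).map (fun fila =>
      ((PySem.List.slice fila none (some m)).filter (fun x => decide (0 < x))).sum)).sum
  let fuel := n.toNat + m.toNat + 1
  let r0 := pvBf a maximo fuel (n-1) (m-1) 0 PySem.Dict.empty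
  let r1 := pvBf a maximo fuel (n-1) (m-1) 1 r0.2
  let r2 := pvBf a maximo fuel (n-1) (m-1) 2 r1.2
  min (min r0.1 r1.1) r2.1

-- ===== PRECONDITION & SPEC =====
-- Exactly the inputs where the Python A returns: A indexes a[i][j] for all 0 ≤ i < n, 0 ≤ j < m
-- and presets matriz[0][0][0], raising IndexError unless n ≥ 1, m ≥ 1 and a has at least n rows
-- each with at least m cells.
def Pre_min_suma_casillas (n : Int) (m : Int) (a : List (List Int)) : Prop :=
  1 ≤ n ∧ 1 ≤ m ∧ n ≤ (a.length : Int) ∧ ∀ fila ∈ a.take n.toNat, m ≤ (fila.length : Int)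
instance (n : Int) (m : Int) (a : List (List Int)) : Decidable (Pre_min_suma_casillas n m a) := by
  unfold Pre_min_suma_casillas; infer_instance

def pvWitness_min_suma_casillas : Int × Int × List (List Int) := (2, 2, [[1, 2], [3, 4]])

def Spec_min_suma_casillas (n : Int) (m : Int) (a : List (List Int)) (out : Int) : Prop :=
  out = min_suma_casillas_alt n m a
instance (n : Int) (m : Int) (a : List (List Int)) (out : Int) :
    Decidable (Spec_min_suma_casillas n m a out) := by unfold Spec_min_suma_casillas; infer_instance

-- ===== CLAIM (what is proved, stated in full; the proofs are below) =====
def Claim_equal_min_suma_casillas : Prop := ∀ (n : Int) (m : Int) (a : List (List Int)),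
  Dom_min_suma_casillas n m a → Pre_min_suma_casillas n m a →
  Spec_min_suma_casillas n m a (min_suma_casillas n m a)

-- ===== LEMMAS AND PROOFS =====

-- pure (memo-free) value of the recursion: the common reference point of both ports
def pvF (a : List (List Int)) (mx : Int) (i j k : Int) : Int :=
  if k == 0 then
    if i == 0 && j == 0 then pvAget a 0 0
    else
      let pa :=
        if i > 0 then
          min (min (pvF a mx (i-1) j 0) (pvF a mx (i-1) j 1)) (pvF a mx (i-1) j 2)
        else mx
      let pi :=
        if j > 0 then
          min (min (pvF a mx i (j-1) 0) (pvF a mx i (j-1) 1)) (pvF a mx i (j-1) 2)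
        else mx
      min pa pi + pvAget a i j
  else if k == 1 then
    if i > 0 && j > 1 then pvF a mx (i-1) (j-2) 0 + pvAget a i j else mx
  else
    if i > 0 && j > 1 then pvF a mx (i-1) (j-2) 1 + pvAget a i j else mx
termination_by (i.toNat, j.toNat)
decreasing_by
  all_goals
    simp only [gt_iff_lt, Bool.and_eq_true, decide_eq_true_eq] at *
    first
      | (apply Prod.Lex.left; omega)
      | (apply Prod.Lex.right; omega)

-- the (normal, jump1, jump2) value triple of one cell
def pvFT (a : List (List Int)) (mx : Int) (i j : Int) : Int × Int × Int :=
  (pvF a mx i j 0, pvF a mx i j 1, pvF a mx i j 2)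

-- B's memo is coherent: every stored value is the pure value of its key
def pvInv (a : List (List Int)) (mx : Int) (memo : PySem.Dict (Int × Int × Int) Int) : Prop :=
  ∀ i j k v, memo.get? (i, j, k) = some v → v = pvF a mx i j k

theorem pvInv_empty (a : List (List Int)) (mx : Int) :
    pvInv a mx PySem.Dict.empty := by
  intro i j k v h
  rw [PySem.Dict.get?_empty] at h
  exact absurd h (by simp)

theorem pvInv_insert (a : List (List Int)) (mx : Int)
    (memo : PySem.Dict (Int × Int × Int) Int) (i j k v : Int)
    (h : pvInv a mx memo) (hv : v = pvF a mx i j k) :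
    pvInv a mx (memo.insert (i, j, k) v) := by
  intro i' j' k' w hw
  rw [PySem.Dict.get?_insert] at hw
  split at hw
  · rename_i heq
    injection heq with h1 h23
    injection h23 with h2 h3
    subst h1; subst h2; subst h3
    injection hw with hw'
    rw [← hw']; exact hv
  · exact h _ _ _ _ hw

theorem pvBf_correct (a : List (List Int)) (mx : Int) :
    ∀ (fuel : Nat) (i j k : Int) (memo : PySem.Dict (Int × Int × Int) Int),
      i.toNat + j.toNat < fuel → pvInv a mx memo →
      (pvBf a mx fuel i j k memo).1 = pvF a mx i j k ∧
        pvInv a mx (pvBf a mx fuel i j k memo).2 := by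
  intro fuel
  induction fuel with
  | zero => intro i j k memo h; exact absurd h (by omega)
  | succ fuel ih =>
  intro i j k memo hsum hmemo
  simp only [pvBf]
  cases hget : memo.get? (i, j, k) with
  | some v =>
      simp only
      exact ⟨hmemo _ _ _ _ hget, hmemo⟩
  | none =>
      simp only
      suffices key : (if (k == 0) = true then
          (if (i == 0 && j == 0) = true then (pvAget a 0 0, memo)
           else
            let pa :=
              if i > 0 then
                let r0 := pvBf a mx fuel (i-1) j 0 memo
                let r1 := pvBf a mx fuel (i-1) j 1 r0.2
                let r2 := pvBf a mx fuel (i-1) j 2 r1.2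
                (min (min r0.1 r1.1) r2.1, r2.2)
              else (mx, memo)
            let pi :=
              if j > 0 then
                let r0 := pvBf a mx fuel i (j-1) 0 pa.2
                let r1 := pvBf a mx fuel i (j-1) 1 r0.2
                let r2 := pvBf a mx fuel i (j-1) 2 r1.2
                (min (min r0.1 r1.1) r2.1, r2.2)
              else (mx, pa.2)
            (min pa.1 pi.1 + pvAget a i j, pi.2))
        else if (k == 1) = true then
          (if (decide (i > 0) && decide (j > 1)) = true then
            let r0 := pvBf a mx fuel (i-1) (j-2) 0 memo
            (r0.1 + pvAget a i j, r0.2)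
          else (mx, memo))
        else
          (if (decide (i > 0) && decide (j > 1)) = true then
            let r1 := pvBf a mx fuel (i-1) (j-2) 1 memo
            (r1.1 + pvAget a i j, r1.2)
          else (mx, memo))).1 = pvF a mx i j k ∧ pvInv a mx (if (k == 0) = true then
          (if (i == 0 && j == 0) = true then (pvAget a 0 0, memo)
           else
            let pa :=
              if i > 0 then
                let r0 := pvBf a mx fuel (i-1) j 0 memo
                let r1 := pvBf a mx fuel (i-1) j 1 r0.2
                let r2 := pvBf a mx fuel (i-1) j 2 r1.2
                (min (min r0.1 r1.1) r2.1, r2.2)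
              else (mx, memo)
            let pi :=
              if j > 0 then
                let r0 := pvBf a mx fuel i (j-1) 0 pa.2
                let r1 := pvBf a mx fuel i (j-1) 1 r0.2
                let r2 := pvBf a mx fuel i (j-1) 2 r1.2
                (min (min r0.1 r1.1) r2.1, r2.2)
              else (mx, pa.2)
            (min pa.1 pi.1 + pvAget a i j, pi.2))
        else if (k == 1) = true then
          (if (decide (i > 0) && decide (j > 1)) = true then
            let r0 := pvBf a mx fuel (i-1) (j-2) 0 memo
            (r0.1 + pvAget a i j, r0.2)
          else (mx, memo))
        else
          (if (decide (i > 0) && decide (j > 1)) = true then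
            let r1 := pvBf a mx fuel (i-1) (j-2) 1 memo
            (r1.1 + pvAget a i j, r1.2)
          else (mx, memo))).2 by
        exact ⟨key.1, pvInv_insert a mx _ i j k _ key.2 key.1⟩
      by_cases hk0 : (k == 0) = true
      · simp only [if_pos hk0]
        by_cases h00 : (i == 0 && j == 0) = true
        · simp only [if_pos h00]
          exact ⟨by rw [pvF]; simp only [if_pos hk0, if_pos h00], hmemo⟩
        · simp only [if_neg h00]
          by_cases hi : i > 0 <;> by_cases hj : j > 0
          · simp only [if_pos hi, if_pos hj]
            have A0 := ih (i-1) j 0 memo (by omega) hmemo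
            have A1 := ih (i-1) j 1 _ (by omega) A0.2
            have A2 := ih (i-1) j 2 _ (by omega) A1.2
            have B0 := ih i (j-1) 0 _ (by omega) A2.2
            have B1 := ih i (j-1) 1 _ (by omega) B0.2
            have B2 := ih i (j-1) 2 _ (by omega) B1.2
            refine ⟨?_, B2.2⟩
            rw [A0.1, A1.1, A2.1, B0.1, B1.1, B2.1]
            conv_rhs => rw [pvF]
            simp only [if_pos hk0, if_neg h00, if_pos hi, if_pos hj]
          · simp only [if_pos hi, if_neg hj]
            have A0 := ih (i-1) j 0 memo (by omega) hmemo
            have A1 := ih (i-1) j 1 _ (by omega) A0.2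
            have A2 := ih (i-1) j 2 _ (by omega) A1.2
            refine ⟨?_, A2.2⟩
            rw [A0.1, A1.1, A2.1]
            conv_rhs => rw [pvF]
            simp only [if_pos hk0, if_neg h00, if_pos hi, if_neg hj]
          · simp only [if_neg hi, if_pos hj]
            have B0 := ih i (j-1) 0 memo (by omega) hmemo
            have B1 := ih i (j-1) 1 _ (by omega) B0.2
            have B2 := ih i (j-1) 2 _ (by omega) B1.2
            refine ⟨?_, B2.2⟩
            rw [B0.1, B1.1, B2.1]
            conv_rhs => rw [pvF]
            simp only [if_pos hk0, if_neg h00, if_neg hi, if_pos hj]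
          · simp only [if_neg hi, if_neg hj]
            refine ⟨?_, hmemo⟩
            rw [pvF]
            simp only [if_pos hk0, if_neg h00, if_neg hi, if_neg hj]
      · simp only [if_neg hk0]
        by_cases hk1 : (k == 1) = true
        · simp only [if_pos hk1]
          by_cases hg : (decide (i > 0) && decide (j > 1)) = true
          · simp only [if_pos hg]
            have hij : i > 0 ∧ j > 1 := by simpa using hg
            have C0 := ih (i-1) (j-2) 0 memo
              (by obtain ⟨h1, h2⟩ := hij; omega) hmemo
            refine ⟨?_, C0.2⟩
            rw [C0.1]
            conv_rhs => rw [pvF]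
            simp only [if_neg hk0, if_pos hk1, if_pos hg]
          · simp only [if_neg hg]
            refine ⟨?_, hmemo⟩
            rw [pvF]
            simp only [if_neg hk0, if_pos hk1, if_neg hg]
        · simp only [if_neg hk1]
          by_cases hg : (decide (i > 0) && decide (j > 1)) = true
          · simp only [if_pos hg]
            have hij : i > 0 ∧ j > 1 := by simpa using hg
            have C1 := ih (i-1) (j-2) 1 memo
              (by obtain ⟨h1, h2⟩ := hij; omega) hmemo
            refine ⟨?_, C1.2⟩
            rw [C1.1]
            conv_rhs => rw [pvF]
            simp only [if_neg hk0, if_neg hk1, if_pos hg]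
          · simp only [if_neg hg]
            refine ⟨?_, hmemo⟩
            rw [pvF]
            simp only [if_neg hk0, if_neg hk1, if_neg hg]


-- ---- the intermediate rolling-row fold (proof-only bridge between the two ports) ----

def pvMinT (t : Int × Int × Int) : Int := min t.1 (min t.2.1 t.2.2)

def pvStepB (maximo : Int) (prev : List (Int × Int × Int)) (fila : List Int) (i : Int)
    (cur : List (Int × Int × Int)) (j : Int) : List (Int × Int × Int) :=
  let v := PySem.List.pyGetD fila j 0
  if i == 0 && j == 0 then cur ++ [(v, maximo, maximo)]
  else
    let arriba := if i > 0 then pvMinT (PySem.List.pyGetD prev j (0, 0, 0)) else maximo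
    let izquierda := if j > 0 then pvMinT (PySem.List.pyGetD cur (-1) (0, 0, 0)) else maximo
    let salto1 := if i > 0 && j > 1 then (PySem.List.pyGetD prev (j-2) (0, 0, 0)).1 + v else maximo
    let salto2 := if i > 0 && j > 1 then (PySem.List.pyGetD prev (j-2) (0, 0, 0)).2.1 + v else maximo
    cur ++ [(min arriba izquierda + v, salto1, salto2)]

def pvFoldB (n : Int) (m : Int) (a : List (List Int)) : Int :=
  let maximo := ((PySem.List.slice a none (some n)).map (fun fila =>
      ((PySem.List.slice fila none (some m)).filter (fun x => decide (0 < x))).sum)).sum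
  let prev := (PySem.List.pyRange 0 n 1).foldl (fun prev i =>
      (PySem.List.pyRange 0 m 1).foldl
        (pvStepB maximo prev (PySem.List.pyGetD a i []) i) []) []
  pvMinT (PySem.List.pyGetD prev (-1) (0, 0, 0))

-- ---- A's table fold equals the rolling-row fold (positional table bookkeeping) ----

-- the 3-element cell list corresponding to a fold-side triple
def pvToL (t : Int × Int × Int) : List Int := [t.1, t.2.1, t.2.2]

theorem pvGetD_append_len {α : Type} (Q : List α) (x : α) (r : List α) (d : α) :
    PySem.List.pyGetD (Q ++ x :: r) (Q.length : Int) d = x := by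
  simp [PySem.List.pyGetD_natCast, List.getD_eq_getElem?_getD]
theorem pvGetD_append_lt {α : Type} (Q r : List α) (k : Nat) (d : α) (h : k < Q.length) :
    PySem.List.pyGetD (Q ++ r) (k : Int) d = PySem.List.pyGetD Q (k : Int) d := by
  simp [PySem.List.pyGetD_natCast, List.getD_eq_getElem?_getD, List.getElem?_append_left h]
theorem pvSetD_append_len {α : Type} (Q : List α) (x : α) (r : List α) (v : α) :
    PySem.List.pySetD (Q ++ x :: r) (Q.length : Int) v = Q ++ v :: r := by
  simp [PySem.List.pySetD_natCast, List.set_append_right _ _ (Nat.le_refl _)]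
theorem pvGetD_map_toL (prev : List (Int × Int × Int)) (j : Nat) (h : j < prev.length)
    (d : List Int) :
    PySem.List.pyGetD (prev.map pvToL) (j : Int) d = pvToL prev[j] := by
  simp [PySem.List.pyGetD_natCast, List.getD_eq_getElem?_getD, h]
theorem pvGetD_nat (prev : List (Int × Int × Int)) (j : Nat) (h : j < prev.length)
    (d : Int × Int × Int) :
    PySem.List.pyGetD prev (j : Int) d = prev[j] := by
  simp [PySem.List.pyGetD_natCast, List.getD_eq_getElem?_getD, h]
theorem pvTset_split (Q : List (List (List Int))) (curL : List (List Int)) (c : List Int)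
    (suf : List (List Int)) (rest : List (List (List Int))) (k : Nat) (v : Int) :
    pvTset (Q ++ (curL ++ c :: suf) :: rest) (Q.length : Int) (curL.length : Int) k v
      = Q ++ (curL ++ c.set k v :: suf) :: rest := by
  unfold pvTset pvTget
  rw [pvGetD_append_len, pvGetD_append_len, pvSetD_append_len, pvSetD_append_len]
theorem pvMin3_toL (t : Int × Int × Int) : pvMin3 (pvToL t) = pvMinT t := by
  simp [pvMin3, pvToL, pvMinT, PySem.List.min?_id_cons, min_assoc]


theorem pvGetD_toL_zero (t : Int × Int × Int) : PySem.List.pyGetD (pvToL t) 0 0 = t.1 := by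
  simp [pvToL, PySem.List.pyGetD_zero_cons]

theorem pvGetD_toL_one (t : Int × Int × Int) : PySem.List.pyGetD (pvToL t) 1 0 = t.2.1 := by
  have h : PySem.List.pyGetD (pvToL t) ((1 : Nat) : Int) 0 = t.2.1 := by
    rw [PySem.List.pyGetD_natCast]; rfl
  simpa using h

theorem pvGetD_last_cur (cur : List (Int × Int × Int)) (j : Nat) (hc : cur.length = j)
    (hj : 1 ≤ j) : PySem.List.pyGetD cur (-1) (0, 0, 0) = cur[j - 1]'(by omega) := by
  rw [PySem.List.pyGetD_neg_ofNat cur 1 (0, 0, 0) (by omega) (by omega)]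
  simp only [hc]

theorem pvTget_prev (Q' : List (List (List Int))) (prev : List (Int × Int × Int))
    (X : List (List (List Int))) (iM1 jI : Int) (hi : iM1 = (Q'.length : Int))
    (j : Nat) (hj : jI = (j : Int)) (hjp : j < prev.length) :
    pvTget ((Q' ++ [prev.map pvToL]) ++ X) iM1 jI = pvToL (prev[j]'hjp) := by
  subst hi hj
  have h : (Q' ++ [prev.map pvToL]) ++ X = Q' ++ (prev.map pvToL) :: X := by simp
  unfold pvTget
  rw [h, pvGetD_append_len, pvGetD_map_toL _ _ hjp]

theorem pvTget_cur (Q : List (List (List Int))) (cur : List (Int × Int × Int)) (c : List Int)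
    (suf : List (List Int)) (rest : List (List (List Int))) (i jI : Int)
    (hi : i = (Q.length : Int)) (j : Nat) (hj : jI = (j : Int)) (hjc : j < cur.length) :
    pvTget (Q ++ ((cur.map pvToL) ++ c :: suf) :: rest) i jI = pvToL (cur[j]'hjc) := by
  subst hi hj; unfold pvTget
  rw [pvGetD_append_len, pvGetD_append_lt _ _ _ _ (by simp; omega), pvGetD_map_toL _ _ hjc]

theorem pvTset_at (Q : List (List (List Int))) (curL : List (List Int)) (c : List Int)
    (suf : List (List Int)) (rest : List (List (List Int))) (i jI : Int)
    (hi : i = (Q.length : Int)) (hj : jI = (curL.length : Int)) (k : Nat) (v : Int) :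
    pvTset (Q ++ (curL ++ c :: suf) :: rest) i jI k v
      = Q ++ (curL ++ c.set k v :: suf) :: rest := by
  subst hi hj; exact pvTset_split Q curL c suf rest k v

theorem pvTget_cur0 (cur : List (Int × Int × Int)) (c : List Int) (suf : List (List Int))
    (rest : List (List (List Int))) (jI : Int) (j : Nat) (hj : jI = (j : Int))
    (hjc : j < cur.length) :
    pvTget (((cur.map pvToL) ++ c :: suf) :: rest) 0 jI = pvToL (cur[j]'hjc) := by
  subst hj; unfold pvTget
  rw [PySem.List.pyGetD_zero_cons, pvGetD_append_lt _ _ _ _ (by simp; omega),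
    pvGetD_map_toL _ _ hjc]

theorem pvTset_at0 (curL : List (List Int)) (c : List Int) (suf : List (List Int))
    (rest : List (List (List Int))) (jI : Int) (hj : jI = (curL.length : Int))
    (k : Nat) (v : Int) :
    pvTset ((curL ++ c :: suf) :: rest) 0 jI k v = (curL ++ c.set k v :: suf) :: rest := by
  subst hj
  have h := pvTset_split [] curL c suf rest k v
  simpa using h

theorem pvGetD_nat' (prev : List (Int × Int × Int)) (jI : Int) (j : Nat)
    (hj : jI = (j : Int)) (h : j < prev.length) (d : Int × Int × Int) :
    PySem.List.pyGetD prev jI d = prev[j]'h := by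
  subst hj; exact pvGetD_nat prev j h d

theorem pvStepA_pos (a : List (List Int)) (mx : Int) (Q' : List (List (List Int)))
    (prev cur : List (Int × Int × Int)) (suf : List (List Int))
    (rest : List (List (List Int))) (j : Nat) (hc : cur.length = j) (hj : j < prev.length) :
    pvStepA a mx ((Q'.length : Int) + 1)
        (Q' ++ prev.map pvToL :: ((cur.map pvToL) ++ [mx, mx, mx] :: suf) :: rest) (j : Int)
      = Q' ++ prev.map pvToL ::
          ((pvStepB mx prev (PySem.List.pyGetD a ((Q'.length : Int) + 1) [])
              ((Q'.length : Int) + 1) cur (j : Int)).map pvToL ++ suf) :: rest := by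
  simp only [pvStepA, pvStepB, pvCell]
  split_ifs with h1 h2 h3 h4 h5 <;>
  first
  | (exfalso
     simp only [beq_iff_eq, Bool.and_eq_true, decide_eq_true_eq, not_and] at *
     omega)
  | (simp only [beq_iff_eq, Bool.and_eq_true, decide_eq_true_eq, not_and] at *
     rw [show (Q' ++ List.map pvToL prev :: ((cur.map pvToL) ++ [mx, mx, mx] :: suf) :: rest)
           = (Q' ++ [List.map pvToL prev]) ++ ((cur.map pvToL) ++ [mx, mx, mx] :: suf) :: rest
         from by simp]
     rw [pvTget_prev Q' prev _ ((Q'.length : Int) + 1 - 1) ((j : Nat) : Int)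
       (by push_cast; ring) j rfl hj]
     try rw [pvTget_prev Q' prev _ ((Q'.length : Int) + 1 - 1) (((j : Nat) : Int) - 2)
       (by push_cast; ring) (j - 2) (by omega) (by omega)]
     try rw [pvGetD_toL_zero]
     try rw [pvTget_cur (Q' ++ [List.map pvToL prev]) cur [mx, mx, mx] suf rest
       ((Q'.length : Int) + 1) (((j : Nat) : Int) - 1) (by simp) (j - 1) (by omega) (by omega)]
     try rw [pvTset_at (Q' ++ [List.map pvToL prev]) (cur.map pvToL) _ _ _
       ((Q'.length : Int) + 1) ((j : Nat) : Int) (by simp) (by simp [hc]) 1 _]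
     try rw [pvTget_prev Q' prev _ ((Q'.length : Int) + 1 - 1) (((j : Nat) : Int) - 2)
       (by push_cast; ring) (j - 2) (by omega) (by omega)]
     try rw [pvGetD_toL_one]
     try rw [pvTset_at (Q' ++ [List.map pvToL prev]) (cur.map pvToL) _ _ _
       ((Q'.length : Int) + 1) ((j : Nat) : Int) (by simp) (by simp [hc]) 2 _]
     rw [pvTset_at (Q' ++ [List.map pvToL prev]) (cur.map pvToL) _ _ _
       ((Q'.length : Int) + 1) ((j : Nat) : Int) (by simp) (by simp [hc]) 0 _]
     rw [pvGetD_nat' prev ((j : Nat) : Int) j rfl hj (0, 0, 0)]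
     try rw [pvGetD_nat' prev (((j : Nat) : Int) - 2) (j - 2) (by omega) (by omega) (0, 0, 0)]
     try rw [pvGetD_last_cur cur j hc (by omega)]
     simp only [pvMin3_toL]
     simp [pvAget, pvToL])

theorem pvStepA_zero (a : List (List Int)) (mx : Int) (cur : List (Int × Int × Int))
    (suf : List (List Int)) (rest : List (List (List Int))) (j : Nat)
    (hc : cur.length = j) (hj1 : 1 ≤ j) :
    pvStepA a mx 0 (((cur.map pvToL) ++ [mx, mx, mx] :: suf) :: rest) (j : Int)
      = ((pvStepB mx [] (PySem.List.pyGetD a 0 []) 0 cur (j : Int)).map pvToL ++ suf) :: rest := by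
  simp only [pvStepA, pvStepB, pvCell]
  split_ifs with h1 h2 h3 h4 h5 <;>
  first
  | (exfalso
     simp only [beq_iff_eq, Bool.and_eq_true, decide_eq_true_eq, not_and] at *
     omega)
  | (rw [pvTget_cur0 cur [mx, mx, mx] suf rest (((j : Nat) : Int) - 1) (j - 1)
       (by omega) (by omega)]
     rw [pvGetD_last_cur cur j hc hj1]
     rw [pvTset_at0 (cur.map pvToL) _ _ _ ((j : Nat) : Int) (by simp [hc]) 0 _]
     simp only [pvMin3_toL]
     simp [pvAget, pvToL])

theorem pvGetD_nat_g {α : Type} (xs : List α) (j : Nat) (h : j < xs.length) (d : α) :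
    PySem.List.pyGetD xs (j : Int) d = xs[j] := by
  simp [PySem.List.pyGetD_natCast, List.getD_eq_getElem?_getD, h]

theorem pvFoldl_pyRange_zero' {β : Type} (f : β → Int → β) (N : Nat) (init : β) :
    (PySem.List.pyRange 0 (N : Int) 1).foldl f init
      = (List.range N).foldl (fun (s : β) (k : Nat) => f s (k : Int)) init := by
  have h : ((N : Int) - 0).toNat = N := by simp
  rw [PySem.List.pyRange_one, h, List.foldl_map]
  have h2 : (fun (s : β) (k : Nat) => f s ((0 : Int) + (k : Int)))
      = fun (s : β) (k : Nat) => f s (k : Int) := by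
    funext s k; rw [Int.zero_add]
  rw [h2]

theorem pvStepB_len' (mx : Int) (prev : List (Int × Int × Int)) (fila : List Int) (i : Int)
    (cur : List (Int × Int × Int)) (j : Int) :
    (pvStepB mx prev fila i cur j).length = cur.length + 1 := by
  simp only [pvStepB]
  split <;> simp

theorem pvInnerB_len (mx : Int) (prev : List (Int × Int × Int)) (fila : List Int) (i : Int) :
    ∀ (d : Nat) (j : Int) (cur : List (Int × Int × Int)),
      ((PySem.List.pyRange j (j + (d : Int)) 1).foldl (pvStepB mx prev fila i) cur).length
        = cur.length + d := by
  intro d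
  induction d with
  | zero =>
      intro j cur
      rw [PySem.List.pyRange_one_eq_nil (by omega)]
      simp
  | succ d ih =>
      intro j cur
      rw [show j + ((d + 1 : Nat) : Int) = (j + 1) + (d : Int) by push_cast; ring]
      rw [PySem.List.pyRange_one_cons (by omega)]
      simp only [List.foldl_cons]
      rw [ih (j + 1) (pvStepB mx prev fila i cur j), pvStepB_len']
      omega

theorem pvInner_zero (a : List (List Int)) (mx : Int) (rest : List (List (List Int))) :
    ∀ (d j : Nat) (cur : List (Int × Int × Int)), cur.length = j → 1 ≤ j →
      (PySem.List.pyRange (j : Int) ((j + d : Nat) : Int) 1).foldl (pvStepA a mx 0)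
          (((cur.map pvToL) ++ List.replicate d [mx, mx, mx]) :: rest)
        = (((PySem.List.pyRange (j : Int) ((j + d : Nat) : Int) 1).foldl
            (pvStepB mx [] (PySem.List.pyGetD a 0 []) 0) cur).map pvToL) :: rest := by
  intro d
  induction d with
  | zero =>
      intro j cur hc hj1
      rw [PySem.List.pyRange_one_eq_nil (by omega)]
      simp
  | succ d ih =>
      intro j cur hc hj1
      rw [show ((j + (d + 1) : Nat) : Int) = (((j + 1) + d : Nat) : Int) by omega]
      rw [PySem.List.pyRange_one_cons (by omega)]
      simp only [List.foldl_cons, List.replicate_succ]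
      rw [pvStepA_zero a mx cur (List.replicate d [mx, mx, mx]) rest j hc hj1]
      have hlen : (pvStepB mx [] (PySem.List.pyGetD a 0 []) 0 cur (j : Int)).length = j + 1 := by
        rw [pvStepB_len']; omega
      have h := ih (j + 1) (pvStepB mx [] (PySem.List.pyGetD a 0 []) 0 cur (j : Int))
        hlen (by omega)
      rw [show ((j : Int) + 1) = (((j + 1 : Nat)) : Int) by push_cast; ring]
      exact h

theorem pvInner_pos (a : List (List Int)) (mx : Int) (Q' : List (List (List Int)))
    (rest : List (List (List Int))) (prev : List (Int × Int × Int)) :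
    ∀ (d j : Nat) (cur : List (Int × Int × Int)), cur.length = j → j + d ≤ prev.length →
      (PySem.List.pyRange (j : Int) ((j + d : Nat) : Int) 1).foldl
          (pvStepA a mx ((Q'.length : Int) + 1))
          (Q' ++ prev.map pvToL :: ((cur.map pvToL) ++ List.replicate d [mx, mx, mx]) :: rest)
        = Q' ++ prev.map pvToL ::
            (((PySem.List.pyRange (j : Int) ((j + d : Nat) : Int) 1).foldl
              (pvStepB mx prev (PySem.List.pyGetD a ((Q'.length : Int) + 1) [])
                ((Q'.length : Int) + 1)) cur).map pvToL) :: rest := by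
  intro d
  induction d with
  | zero =>
      intro j cur hc hd
      rw [PySem.List.pyRange_one_eq_nil (by omega)]
      simp
  | succ d ih =>
      intro j cur hc hd
      rw [show ((j + (d + 1) : Nat) : Int) = (((j + 1) + d : Nat) : Int) by omega]
      rw [PySem.List.pyRange_one_cons (by omega)]
      simp only [List.foldl_cons, List.replicate_succ]
      rw [pvStepA_pos a mx Q' prev cur (List.replicate d [mx, mx, mx]) rest j hc (by omega)]
      have hlen : (pvStepB mx prev (PySem.List.pyGetD a ((Q'.length : Int) + 1) [])
          ((Q'.length : Int) + 1) cur (j : Int)).length = j + 1 := by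
        rw [pvStepB_len']; omega
      have h := ih (j + 1) (pvStepB mx prev (PySem.List.pyGetD a ((Q'.length : Int) + 1) [])
          ((Q'.length : Int) + 1) cur (j : Int)) hlen (by omega)
      rw [show ((j : Int) + 1) = (((j + 1 : Nat)) : Int) by push_cast; ring]
      exact h

theorem pvOuter (a : List (List Int)) (mx : Int) (M : Nat) :
    ∀ (d : Nat) (Q' : List (List (List Int))) (prev : List (Int × Int × Int)) (i0 : Int),
      prev.length = M → i0 = (Q'.length : Int) + 1 →
      ∃ Q'' : List (List (List Int)),
        ((PySem.List.pyRange i0 (i0 + (d : Int)) 1).foldl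
            (fun mz i => (PySem.List.pyRange 0 (M : Int) 1).foldl (pvStepA a mx i) mz)
            (Q' ++ prev.map pvToL :: List.replicate d (List.replicate M [mx, mx, mx])))
          = Q'' ++ [((PySem.List.pyRange i0 (i0 + (d : Int)) 1).foldl
                (fun pr i => (PySem.List.pyRange 0 (M : Int) 1).foldl
                  (pvStepB mx pr (PySem.List.pyGetD a i []) i) []) prev).map pvToL]
          ∧ Q''.length = Q'.length + d
          ∧ ((PySem.List.pyRange i0 (i0 + (d : Int)) 1).foldl
                (fun pr i => (PySem.List.pyRange 0 (M : Int) 1).foldl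
                  (pvStepB mx pr (PySem.List.pyGetD a i []) i) []) prev).length = M := by
  intro d
  induction d with
  | zero =>
      intro Q' prev i0 hp hi0
      refine ⟨Q', ?_, by omega, ?_⟩
      · rw [PySem.List.pyRange_one_eq_nil (show i0 + ((0 : Nat) : Int) ≤ i0 by omega)]; simp
      · rw [PySem.List.pyRange_one_eq_nil (show i0 + ((0 : Nat) : Int) ≤ i0 by omega)]
        simpa using hp
  | succ d ih =>
      intro Q' prev i0 hp hi0
      rw [show i0 + ((d + 1 : Nat) : Int) = (i0 + 1) + (d : Int) by push_cast; ring]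
      rw [PySem.List.pyRange_one_cons (show i0 < i0 + 1 + (d : Int) by omega)]
      simp only [List.foldl_cons, List.replicate_succ]
      rw [hi0]
      have hrow := pvInner_pos a mx Q' (List.replicate d (List.replicate M [mx, mx, mx]))
        prev M 0 [] rfl (by omega)
      simp only [Nat.cast_zero, Nat.zero_add, List.map_nil, List.nil_append] at hrow
      rw [hrow]
      have hrblen : ((PySem.List.pyRange 0 (M : Int) 1).foldl
          (pvStepB mx prev (PySem.List.pyGetD a ((Q'.length : Int) + 1) [])
            ((Q'.length : Int) + 1)) []).length = M := by
        have h := pvInnerB_len mx prev (PySem.List.pyGetD a ((Q'.length : Int) + 1) [])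
          ((Q'.length : Int) + 1) M 0 []
        simpa using h
      obtain ⟨Q'', e1, e2, e3⟩ := ih (Q' ++ [prev.map pvToL])
        ((PySem.List.pyRange 0 (M : Int) 1).foldl
          (pvStepB mx prev (PySem.List.pyGetD a ((Q'.length : Int) + 1) [])
            ((Q'.length : Int) + 1)) [])
        ((Q'.length : Int) + 1 + 1) hrblen (by simp)
      rw [show Q' ++ (prev.map pvToL) ::
            (((PySem.List.pyRange 0 (M : Int) 1).foldl
              (pvStepB mx prev (PySem.List.pyGetD a ((Q'.length : Int) + 1) [])
                ((Q'.length : Int) + 1)) []).map pvToL) ::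
            List.replicate d (List.replicate M [mx, mx, mx])
          = (Q' ++ [prev.map pvToL]) ++
            (((PySem.List.pyRange 0 (M : Int) 1).foldl
              (pvStepB mx prev (PySem.List.pyGetD a ((Q'.length : Int) + 1) [])
                ((Q'.length : Int) + 1)) []).map pvToL) ::
            List.replicate d (List.replicate M [mx, mx, mx]) from by simp]
      refine ⟨Q'', e1, ?_, e3⟩
      simp only [List.length_append, List.length_cons, List.length_nil] at e2
      omega

theorem pvFoldl_congr_mem {α β : Type} (l : List α) (f g : β → α → β) :
    ∀ (init : β), (∀ b x, x ∈ l → f b x = g b x) → l.foldl f init = l.foldl g init := by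
  induction l with
  | nil => intro init _; rfl
  | cons x t ih =>
      intro init h
      simp only [List.foldl_cons]
      rw [h init x (by simp)]
      exact ih _ (fun b y hy => h b y (by simp [hy]))

theorem pvFoldl_if_pos (l : List Int) : ∀ (mx : Int),
    l.foldl (fun s x => if x > 0 then s + x else s) mx
      = mx + (l.filter (fun x => decide (0 < x))).sum := by
  induction l with
  | nil => intro mx; simp
  | cons x t ih =>
      intro mx
      by_cases h : x > 0
      · simp only [List.foldl_cons, List.filter_cons, h, decide_true]
        rw [ih]
        simp [Int.add_assoc]
      · simp only [List.foldl_cons, List.filter_cons, if_neg h]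
        rw [ih]
        simp [h]

theorem pvFoldl_range_getD {α β : Type} (f : β → α → β) (xs : List α) (d : α) :
    ∀ (M : Nat), M ≤ xs.length → ∀ (init : β),
      (List.range M).foldl (fun (s : β) (k : Nat) => f s (PySem.List.pyGetD xs (k : Int) d)) init
        = (xs.take M).foldl f init := by
  intro M
  induction M with
  | zero => intro _ init; simp
  | succ M ih =>
      intro hM init
      rw [List.range_succ, List.foldl_append, ih (by omega) init, List.take_succ,
        List.getElem?_eq_getElem (show M < xs.length by omega)]
      simp only [Option.toList_some, List.foldl_append, List.foldl_cons, List.foldl_nil]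
      rw [pvGetD_nat_g xs M (by omega) d]

theorem pvFoldl_add_sum {α : Type} (g : α → Int) (l : List α) : ∀ (init : Int),
    l.foldl (fun s x => s + g x) init = init + (l.map g).sum := by
  induction l with
  | nil => intro init; simp
  | cons x t ih => intro init; simp only [List.foldl_cons, List.map_cons, List.sum_cons]
                   rw [ih]; ring

theorem pvMaximo_eq (N M : Nat) (a : List (List Int)) (hna : N ≤ a.length)
    (hrow : ∀ fila ∈ a.take N, M ≤ fila.length) :
    (PySem.List.pyRange 0 (N : Int) 1).foldl (fun mx i =>
      (PySem.List.pyRange 0 (M : Int) 1).foldl (fun mx j =>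
        if pvAget a i j > 0 then mx + pvAget a i j else mx) mx) 0
    = ((PySem.List.slice a none (some (N : Int))).map (fun fila =>
        ((PySem.List.slice fila none (some (M : Int))).filter (fun x => decide (0 < x))).sum)).sum := by
  rw [PySem.List.slice_to a (show (0 : Int) ≤ (N : Int) by omega)]
  have hsl : ∀ fila : List Int, PySem.List.slice fila none (some (M : Int)) = fila.take M := by
    intro fila
    rw [PySem.List.slice_to fila (show (0 : Int) ≤ (M : Int) by omega)]
    simp
  simp only [hsl, Int.toNat_natCast]
  rw [pvFoldl_pyRange_zero']
  have hbody : ∀ (mx : Int) (k : Nat), k ∈ List.range N →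
      (PySem.List.pyRange 0 (M : Int) 1).foldl (fun mx j =>
        if pvAget a (k : Int) j > 0 then mx + pvAget a (k : Int) j else mx) mx
      = mx + (((PySem.List.pyGetD a ((k : Nat) : Int) ([] : List Int)).take M).filter
          (fun x => decide (0 < x))).sum := by
    intro mx k hk
    have hkN : k < N := by simpa using hk
    have hlen : M ≤ (PySem.List.pyGetD a ((k : Nat) : Int) ([] : List Int)).length := by
      rw [pvGetD_nat_g a k (by omega) []]
      have h1 : k < (a.take N).length := by simp only [List.length_take]; omega
      have h2 := List.getElem_mem h1
      exact hrow _ (by simpa using h2)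
    rw [pvFoldl_pyRange_zero']
    simp only [pvAget]
    rw [pvFoldl_range_getD (fun s x => if x > 0 then s + x else s)
      (PySem.List.pyGetD a ((k : Nat) : Int) ([] : List Int)) 0 M hlen mx]
    rw [pvFoldl_if_pos]
  rw [pvFoldl_congr_mem (List.range N) _
    (fun mx k => mx + (((PySem.List.pyGetD a ((k : Nat) : Int) ([] : List Int)).take M).filter
      (fun x => decide (0 < x))).sum) 0 hbody]
  rw [pvFoldl_range_getD (fun s fila => s + ((fila.take M).filter (fun x => decide (0 < x))).sum)
    a [] N hna 0]
  rw [pvFoldl_add_sum]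
  simp

theorem pvTset_00 (c : List Int) (suf : List (List Int)) (rest : List (List (List Int)))
    (k : Nat) (v : Int) :
    pvTset ((c :: suf) :: rest) 0 0 k v = (c.set k v :: suf) :: rest := by
  have h := pvTset_at0 [] c suf rest 0 (by simp) k v
  simpa using h

theorem pvTget_last (Q' : List (List (List Int))) (prev : List (Int × Int × Int))
    (iM1 jI : Int) (hi : iM1 = (Q'.length : Int)) (j : Nat) (hj : jI = (j : Int))
    (hjp : j < prev.length) :
    pvTget (Q' ++ [prev.map pvToL]) iM1 jI = pvToL (prev[j]'hjp) := by
  have h := pvTget_prev Q' prev [] iM1 jI hi j hj hjp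
  simpa using h
theorem pvMain (n m : Int) (a : List (List Int)) (hn : 1 ≤ n) (hm : 1 ≤ m)
    (hna : n ≤ (a.length : Int)) (hrow : ∀ fila ∈ a.take n.toNat, m ≤ (fila.length : Int)) :
    min_suma_casillas n m a = pvFoldB n m a := by
  obtain ⟨N', hN⟩ : ∃ N' : Nat, n = ((N' + 1 : Nat) : Int) := ⟨(n - 1).toNat, by omega⟩
  obtain ⟨M', hM⟩ : ∃ M' : Nat, m = ((M' + 1 : Nat) : Int) := ⟨(m - 1).toNat, by omega⟩
  subst hN hM
  have hna' : N' + 1 ≤ a.length := by omega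
  have hrow' : ∀ fila ∈ a.take (N' + 1), M' + 1 ≤ fila.length := by
    intro fila hf
    have h := hrow fila (by simpa using hf)
    omega
  simp only [min_suma_casillas, pvFoldB]
  rw [pvMaximo_eq (N' + 1) (M' + 1) a hna' hrow']
  set mx := ((PySem.List.slice a none (some ((N' + 1 : Nat) : Int))).map (fun fila =>
      ((PySem.List.slice fila none (some ((M' + 1 : Nat) : Int))).filter
        (fun x => decide (0 < x))).sum)).sum with hmxdef
  have hm0 : (PySem.List.pyRange 0 ((N' + 1 : Nat) : Int) 1).map (fun _ =>
      (PySem.List.pyRange 0 ((M' + 1 : Nat) : Int) 1).map (fun _ => [mx, mx, mx]))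
      = List.replicate (N' + 1) (List.replicate (M' + 1) [mx, mx, mx]) := by
    simp [List.map_const', PySem.List.length_pyRange_one]
  rw [hm0]
  have hsplit : List.replicate (N' + 1) (List.replicate (M' + 1) ([mx, mx, mx] : List Int))
      = ([mx, mx, mx] :: List.replicate M' [mx, mx, mx])
        :: List.replicate N' (List.replicate (M' + 1) [mx, mx, mx]) := by
    simp [List.replicate_succ]
  rw [hsplit]
  rw [pvTset_00 [mx, mx, mx] (List.replicate M' [mx, mx, mx]) _ 0 (pvAget a 0 0)]
  rw [show ([mx, mx, mx] : List Int).set 0 (pvAget a 0 0) = [pvAget a 0 0, mx, mx] from rfl]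
  rw [show pvAget a 0 0 = PySem.List.pyGetD (PySem.List.pyGetD a 0 []) 0 0 from rfl]
  rw [PySem.List.pyRange_one_cons (show (0 : Int) < ((N' + 1 : Nat) : Int) by omega)]
  simp only [List.foldl_cons]
  have hB0 : (PySem.List.pyRange 0 ((M' + 1 : Nat) : Int) 1).foldl
      (pvStepB mx [] (PySem.List.pyGetD a 0 []) 0) []
      = (PySem.List.pyRange 1 ((M' + 1 : Nat) : Int) 1).foldl
        (pvStepB mx [] (PySem.List.pyGetD a 0 []) 0)
        [(PySem.List.pyGetD (PySem.List.pyGetD a 0 []) 0 0, mx, mx)] := by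
    rw [PySem.List.pyRange_one_cons (show (0 : Int) < ((M' + 1 : Nat) : Int) by omega)]
    simp only [List.foldl_cons]
    rw [show pvStepB mx [] (PySem.List.pyGetD a 0 []) 0 [] 0
        = [(PySem.List.pyGetD (PySem.List.pyGetD a 0 []) 0 0, mx, mx)] from by simp [pvStepB]]
    rw [show ((0 : Int) + 1) = 1 from by norm_num]
  have hA0 : (PySem.List.pyRange 0 ((M' + 1 : Nat) : Int) 1).foldl (pvStepA a mx 0)
      (([PySem.List.pyGetD (PySem.List.pyGetD a 0 []) 0 0, mx, mx]
          :: List.replicate M' [mx, mx, mx])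
        :: List.replicate N' (List.replicate (M' + 1) [mx, mx, mx]))
      = (((PySem.List.pyRange 1 ((M' + 1 : Nat) : Int) 1).foldl
          (pvStepB mx [] (PySem.List.pyGetD a 0 []) 0)
          [(PySem.List.pyGetD (PySem.List.pyGetD a 0 []) 0 0, mx, mx)]).map pvToL)
        :: List.replicate N' (List.replicate (M' + 1) [mx, mx, mx]) := by
    rw [PySem.List.pyRange_one_cons (show (0 : Int) < ((M' + 1 : Nat) : Int) by omega)]
    simp only [List.foldl_cons]
    rw [show pvStepA a mx 0
        (([PySem.List.pyGetD (PySem.List.pyGetD a 0 []) 0 0, mx, mx]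
            :: List.replicate M' [mx, mx, mx])
          :: List.replicate N' (List.replicate (M' + 1) [mx, mx, mx])) 0
        = (([PySem.List.pyGetD (PySem.List.pyGetD a 0 []) 0 0, mx, mx]
            :: List.replicate M' [mx, mx, mx])
          :: List.replicate N' (List.replicate (M' + 1) [mx, mx, mx])) from by simp [pvStepA]]
    have hz := pvInner_zero a mx (List.replicate N' (List.replicate (M' + 1) [mx, mx, mx])) M' 1
      [(PySem.List.pyGetD (PySem.List.pyGetD a 0 []) 0 0, mx, mx)] (by simp) (le_refl 1)
    rw [show (1 + M' : Nat) = M' + 1 from by omega] at hz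
    simp only [Nat.cast_one, List.map_cons, List.map_nil, List.cons_append, List.nil_append,
      pvToL] at hz
    rw [show ((0 : Int) + 1) = 1 from by norm_num]
    exact hz
  rw [hA0, hB0]
  set rowB0 := (PySem.List.pyRange 1 ((M' + 1 : Nat) : Int) 1).foldl
      (pvStepB mx [] (PySem.List.pyGetD a 0 []) 0)
      [(PySem.List.pyGetD (PySem.List.pyGetD a 0 []) 0 0, mx, mx)] with hrb0
  have hlen0 : rowB0.length = M' + 1 := by
    rw [hrb0]
    have h := pvInnerB_len mx [] (PySem.List.pyGetD a 0 []) 0 M' 1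
      [(PySem.List.pyGetD (PySem.List.pyGetD a 0 []) 0 0, mx, mx)]
    rw [show (1 : Int) + (M' : Int) = ((M' + 1 : Nat) : Int) from by push_cast; ring] at h
    rw [h]
    simp [Nat.add_comm]
  obtain ⟨Q'', e1, e2, e3⟩ := pvOuter a mx (M' + 1) N' [] rowB0 1 hlen0 (by simp)
  rw [show ((0 : Int) + 1) = (1 : Int) from by norm_num]
  rw [show ((N' + 1 : Nat) : Int) = 1 + (N' : Int) from by push_cast; ring]
  simp only [List.nil_append] at e1
  rw [e1]
  set prevFin := (PySem.List.pyRange 1 (1 + (N' : Int)) 1).foldl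
      (fun pr i => (PySem.List.pyRange 0 ((M' + 1 : Nat) : Int) 1).foldl
        (pvStepB mx pr (PySem.List.pyGetD a i []) i) []) rowB0 with hpf
  rw [pvTget_last Q'' prevFin (1 + (N' : Int) - 1) (((M' + 1 : Nat) : Int) - 1)
    (by rw [e2]; push_cast; simp) M' (by push_cast; ring) (by omega)]
  rw [pvMin3_toL]
  rw [pvGetD_last_cur prevFin (M' + 1) e3 (by omega)]
  simp only [Nat.add_sub_cancel]


-- ---- the rolling-row fold computes the pure recursion pvF ----

theorem pvF0_origin (a : List (List Int)) (mx : Int) : pvF a mx 0 0 0 = pvAget a 0 0 := by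
  rw [pvF]; simp

theorem pvF0_eq (a : List (List Int)) (mx : Int) (i j : Int)
    (h00 : ¬ ((i == 0 && j == 0) = true)) :
    pvF a mx i j 0
      = min (if i > 0 then
              min (min (pvF a mx (i-1) j 0) (pvF a mx (i-1) j 1)) (pvF a mx (i-1) j 2)
            else mx)
            (if j > 0 then
              min (min (pvF a mx i (j-1) 0) (pvF a mx i (j-1) 1)) (pvF a mx i (j-1) 2)
            else mx) + pvAget a i j := by
  conv_lhs => rw [pvF]
  rw [if_pos (by decide : (((0 : Int) == 0) = true)), if_neg h00]

theorem pvF1_eq (a : List (List Int)) (mx : Int) (i j : Int) :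
    pvF a mx i j 1
      = if (decide (i > 0) && decide (j > 1)) = true then pvF a mx (i-1) (j-2) 0 + pvAget a i j
        else mx := by
  conv_lhs => rw [pvF]
  rw [if_neg (by decide : ¬ (((1 : Int) == 0) = true)),
    if_pos (by decide : (((1 : Int) == 1) = true))]

theorem pvF2_eq (a : List (List Int)) (mx : Int) (i j : Int) :
    pvF a mx i j 2
      = if (decide (i > 0) && decide (j > 1)) = true then pvF a mx (i-1) (j-2) 1 + pvAget a i j
        else mx := by
  conv_lhs => rw [pvF]
  rw [if_neg (by decide : ¬ (((2 : Int) == 0) = true)),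
    if_neg (by decide : ¬ (((2 : Int) == 1) = true))]

theorem pvMinT_FT (a : List (List Int)) (mx : Int) (i j : Int) :
    pvMinT (pvFT a mx i j)
      = min (min (pvF a mx i j 0) (pvF a mx i j 1)) (pvF a mx i j 2) := by
  simp [pvMinT, pvFT, min_assoc]

theorem pvStepB_F (a : List (List Int)) (mx : Int) (i : Int) (M : Nat)
    (prev cur : List (Int × Int × Int)) (j : Nat) (hjM : j < M)
    (hprev : 0 < i → prev.length = M ∧
      ∀ j' (h : j' < prev.length), prev[j'] = pvFT a mx (i-1) (j' : Int))
    (hcl : cur.length = j)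
    (hcv : ∀ j' (h : j' < cur.length), cur[j'] = pvFT a mx i (j' : Int)) :
    pvStepB mx prev (PySem.List.pyGetD a i []) i cur (j : Int)
      = cur ++ [pvFT a mx i (j : Int)] := by
  simp only [pvStepB]
  by_cases h00 : ((i == 0 && (j : Int) == 0) = true)
  · simp only [if_pos h00]
    have hij : i = 0 ∧ (j : Int) = 0 := by simpa using h00
    obtain ⟨hi0, hj0⟩ := hij
    have h1 : pvF a mx i (j : Int) 0 = pvAget a i (j : Int) := by
      rw [hi0, hj0]; exact pvF0_origin a mx
    have h2 : pvF a mx i (j : Int) 1 = mx := by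
      rw [pvF1_eq, if_neg (by rw [hi0]; simp)]
    have h3 : pvF a mx i (j : Int) 2 = mx := by
      rw [pvF2_eq, if_neg (by rw [hi0]; simp)]
    simp only [pvFT, h1, h2, h3]
    rfl
  · simp only [if_neg h00]
    refine congrArg (fun t => cur ++ [t]) ?_
    have hcomp0 : (if i > 0 then pvMinT (PySem.List.pyGetD prev (j : Int) (0, 0, 0)) else mx)
        = (if i > 0 then
            min (min (pvF a mx (i-1) (j : Int) 0) (pvF a mx (i-1) (j : Int) 1))
              (pvF a mx (i-1) (j : Int) 2)
          else mx) := by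
      by_cases hip : i > 0
      · obtain ⟨hpl, hpv⟩ := hprev hip
        rw [if_pos hip, if_pos hip, pvGetD_nat prev j (by omega) _, hpv j (by omega), pvMinT_FT]
      · rw [if_neg hip, if_neg hip]
    have hcompL : (if (j : Int) > 0 then pvMinT (PySem.List.pyGetD cur (-1) (0, 0, 0)) else mx)
        = (if (j : Int) > 0 then
            min (min (pvF a mx i ((j : Int)-1) 0) (pvF a mx i ((j : Int)-1) 1))
              (pvF a mx i ((j : Int)-1) 2)
          else mx) := by
      by_cases hjp : (j : Int) > 0
      · have hj1 : 1 ≤ j := by omega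
        rw [if_pos hjp, if_pos hjp, pvGetD_last_cur cur j hcl hj1, hcv (j-1) (by omega),
          show (((j - 1 : Nat)) : Int) = (j : Int) - 1 by omega, pvMinT_FT]
      · rw [if_neg hjp, if_neg hjp]
    have hsal : (decide (i > 0) && decide ((j : Int) > 1)) = true →
        PySem.List.pyGetD prev ((j : Int) - 2) (0, 0, 0) = pvFT a mx (i-1) ((j : Int) - 2) := by
      intro hg
      have hij2 : i > 0 ∧ (j : Int) > 1 := by simpa using hg
      obtain ⟨hpl, hpv⟩ := hprev hij2.1
      obtain ⟨hg1, hg2⟩ := hij2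
      rw [pvGetD_nat' prev ((j : Int) - 2) (j - 2) (by omega) (by omega) _,
        hpv (j - 2) (by omega), show (((j - 2 : Nat)) : Int) = (j : Int) - 2 by omega]
    simp only [pvFT, Prod.mk.injEq]
    refine ⟨?_, ?_, ?_⟩
    · rw [pvF0_eq a mx i (j : Int) h00, hcomp0, hcompL]
      rfl
    · rw [pvF1_eq]
      by_cases hg : (decide (i > 0) && decide ((j : Int) > 1)) = true
      · rw [if_pos hg, if_pos hg, hsal hg]
        rfl
      · rw [if_neg hg, if_neg hg]
    · rw [pvF2_eq]
      by_cases hg : (decide (i > 0) && decide ((j : Int) > 1)) = true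
      · rw [if_pos hg, if_pos hg, hsal hg]
        rfl
      · rw [if_neg hg, if_neg hg]

theorem pvRowB (a : List (List Int)) (mx : Int) (i : Int) (M : Nat)
    (prev : List (Int × Int × Int))
    (hprev : 0 < i → prev.length = M ∧
      ∀ j' (h : j' < prev.length), prev[j'] = pvFT a mx (i-1) (j' : Int)) :
    ∀ (d j : Nat) (cur : List (Int × Int × Int)), j + d ≤ M → cur.length = j →
      (∀ j' (h : j' < cur.length), cur[j'] = pvFT a mx i (j' : Int)) →
      (PySem.List.pyRange (j : Int) ((j + d : Nat) : Int) 1).foldl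
          (pvStepB mx prev (PySem.List.pyGetD a i []) i) cur
        = cur ++ (List.range' j d).map (fun (j' : Nat) => pvFT a mx i ((j' : Nat) : Int)) := by
  intro d
  induction d with
  | zero =>
      intro j cur _ _ _
      rw [PySem.List.pyRange_one_eq_nil (by omega)]
      simp
  | succ d ih =>
      intro j cur hjd hcl hcv
      rw [show ((j + (d + 1) : Nat) : Int) = (((j + 1) + d : Nat) : Int) by omega]
      rw [PySem.List.pyRange_one_cons (by omega)]
      simp only [List.foldl_cons]
      rw [pvStepB_F a mx i M prev cur j (by omega) hprev hcl hcv]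
      rw [show ((j : Int) + 1) = (((j + 1 : Nat)) : Int) by push_cast; ring]
      rw [ih (j + 1) (cur ++ [pvFT a mx i (j : Int)]) (by omega) (by simp [hcl]) ?_]
      · rw [List.range'_succ]
        simp
      · intro j' h
        by_cases hlt : j' < cur.length
        · rw [List.getElem_append_left hlt]
          exact hcv j' hlt
        · have hj' : j' = cur.length := by
            simp only [List.length_append, List.length_cons, List.length_nil] at h
            omega
          subst hj'
          simp [hcl]

def pvRowProp (a : List (List Int)) (mx : Int) (iIdx : Int)
    (P : List (Int × Int × Int)) (M : Nat) : Prop :=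
  P.length = M ∧ ∀ j' (h : j' < P.length), P[j'] = pvFT a mx iIdx (j' : Int)

theorem pvRowsB (a : List (List Int)) (mx : Int) (M : Nat) :
    ∀ (d : Nat) (i0 : Int) (prev : List (Int × Int × Int)), 0 ≤ i0 →
      pvRowProp a mx (i0 - 1) prev M →
      pvRowProp a mx (i0 + (d : Int) - 1)
        ((PySem.List.pyRange i0 (i0 + (d : Int)) 1).foldl (fun pr i =>
          (PySem.List.pyRange 0 (M : Int) 1).foldl
            (pvStepB mx pr (PySem.List.pyGetD a i []) i) []) prev) M := by
  intro d
  induction d with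
  | zero =>
      intro i0 prev h0 hp
      have hr : PySem.List.pyRange i0 (i0 + ((0 : Nat) : Int)) 1 = [] :=
        PySem.List.pyRange_one_eq_nil (by omega)
      rw [hr]
      simpa using hp
  | succ d ih =>
      intro i0 prev h0 hp
      obtain ⟨hl, hv⟩ := hp
      rw [show i0 + ((d + 1 : Nat) : Int) = (i0 + 1) + (d : Int) by push_cast; ring]
      have hr : PySem.List.pyRange i0 ((i0 + 1) + (d : Int)) 1
          = i0 :: PySem.List.pyRange (i0 + 1) ((i0 + 1) + (d : Int)) 1 :=
        PySem.List.pyRange_one_cons (by omega)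
      rw [hr]
      simp only [List.foldl_cons]
      have hrow := pvRowB a mx i0 M prev (fun _ => ⟨hl, hv⟩) M 0 []
        (by omega) rfl (by intro j' h; simp at h)
      simp only [Nat.cast_zero, Nat.zero_add, List.nil_append] at hrow
      rw [hrow]
      have hp1 : pvRowProp a mx ((i0 + 1) - 1)
          ((List.range' 0 M).map (fun (j' : Nat) => pvFT a mx i0 ((j' : Nat) : Int))) M := by
        refine ⟨by simp, ?_⟩
        intro j' h
        simp only [List.getElem_map, List.getElem_range']
        norm_num
      exact ih (i0 + 1) _ (by omega) hp1

theorem pvFoldRows (a : List (List Int)) (mx : Int) (N M : Nat) (hN : 1 ≤ N) :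
    pvRowProp a mx ((N : Int) - 1)
      ((PySem.List.pyRange 0 (N : Int) 1).foldl (fun pr i =>
        (PySem.List.pyRange 0 (M : Int) 1).foldl
          (pvStepB mx pr (PySem.List.pyGetD a i []) i) []) []) M := by
  rw [show ((N : Int)) = 1 + ((N - 1 : Nat) : Int) by omega]
  have hr : PySem.List.pyRange 0 (1 + ((N - 1 : Nat) : Int)) 1
      = 0 :: PySem.List.pyRange (0 + 1) (1 + ((N - 1 : Nat) : Int)) 1 :=
    PySem.List.pyRange_one_cons (by omega)
  rw [hr]
  simp only [List.foldl_cons]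
  have hrow := pvRowB a mx 0 M [] (fun h => absurd h (by omega)) M 0 []
    (by omega) rfl (by intro j' h; simp at h)
  simp only [Nat.cast_zero, Nat.zero_add, List.nil_append] at hrow
  rw [hrow]
  have hp1 : pvRowProp a mx ((0 : Int) + 1 - 1)
      ((List.range' 0 M).map (fun (j' : Nat) => pvFT a mx 0 ((j' : Nat) : Int))) M := by
    refine ⟨by simp, ?_⟩
    intro j' h
    simp only [List.getElem_map, List.getElem_range']
    norm_num
  have h := pvRowsB a mx M (N - 1) ((0 : Int) + 1) _ (by omega) hp1
  rwa [show (0 : Int) + 1 + ((N - 1 : Nat) : Int) - 1 = 1 + ((N - 1 : Nat) : Int) - 1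
    by ring] at h

theorem pvFoldB_alt (n m : Int) (a : List (List Int)) (hn : 1 ≤ n) (hm : 1 ≤ m) :
    pvFoldB n m a = min_suma_casillas_alt n m a := by
  simp only [pvFoldB, min_suma_casillas_alt]
  set mx := ((PySem.List.slice a none (some n)).map (fun fila =>
      ((PySem.List.slice fila none (some m)).filter (fun x => decide (0 < x))).sum)).sum with hmx
  have h0 := pvBf_correct a mx (n.toNat + m.toNat + 1) (n-1) (m-1) 0 PySem.Dict.empty
    (by omega) (pvInv_empty a mx)
  have h1 := pvBf_correct a mx (n.toNat + m.toNat + 1) (n-1) (m-1) 1 _ (by omega) h0.2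
  have h2 := pvBf_correct a mx (n.toNat + m.toNat + 1) (n-1) (m-1) 2 _ (by omega) h1.2
  rw [h0.1, h1.1, h2.1]
  have hN : n = ((n.toNat : Nat) : Int) := by omega
  have hM : m = ((m.toNat : Nat) : Int) := by omega
  rw [hN, hM]
  obtain ⟨hlen, hval⟩ := pvFoldRows a mx n.toNat m.toNat (by omega)
  rw [pvGetD_last_cur _ m.toNat hlen (by omega)]
  rw [hval (m.toNat - 1) (by omega)]
  rw [pvMinT_FT]
  rw [show (((m.toNat - 1 : Nat)) : Int) = ((m.toNat : Nat) : Int) - 1 by omega]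

-- ===== VERDICT (by name: the statement is the Claim_ definition above) =====
theorem min_suma_casillas_spec : Claim_equal_min_suma_casillas := by
  intro n m a hdom hpre
  obtain ⟨hn, hm, hna, hrow⟩ := hpre
  unfold Spec_min_suma_casillas
  rw [pvMain n m a hn hm hna hrow, pvFoldB_alt n m a hn hm]
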